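-- pv_equiv track=rewrite | github.com/jiwon-km/CodingTest | 프로그래머스/할인행사.py | solution
-- ===== SOURCE A (Python) =====
-- def solution(want, number, discount):
--     total_num = sum(number)
--     answer = 0
--
--     window = discount[:total_num]
--     counts = [window.count(item) for item in want]
--
--     if counts == number:
--         answer += 1
--
--     for i in range(1, len(discount) - total_num + 1):
--         if discount[i-1] in want:
--             counts[want.index(discount[i-1])] -= 1
--         if discount[i+total_num-1] in want:
--             counts[want.index(discount[i+total_num-1])] += 1
--
--         if counts == number:
--             answer += 1
--
--     return answer
-- ===== SOURCE B (Python) =====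
-- def solution(want, number, discount):
--     t = sum(number)
--     k = len(want)
--     if len(number) != k:
--         return 0  # a window's counts (length k) can never equal number then
--     idx = {w: j for j, w in enumerate(want)}
--     ids = [idx.get(x, -1) for x in discount]
--     cnt = [0] * k
--     matched = sum(1 for n in number if n == 0)
--     def move(j, d):
--         nonlocal matched
--         if j >= 0:
--             if cnt[j] == number[j]:
--                 matched -= 1
--             cnt[j] += d
--             if cnt[j] == number[j]:
--                 matched += 1
--     for j in ids[:t]:
--         move(j, 1)
--     answer = 1 if matched == k else 0
--     for s in range(t, len(ids)):
--         move(ids[s], 1)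
--         move(ids[s - t], -1)
--         if matched == k:
--             answer += 1
--     return answer
-- ===== Notes on version B (the rewrite author's own statement) =====
-- stated objective: faster
-- what changed: B precomputes a product->index dict and maps discount to index ids once, then slides the window maintaining counts and an incremental matched-counter, replacing A's per-slide list membership test, list.index scan and full counts==number list comparison per window.
-- outside the precondition, e.g. on solution(['b', 'b'], [0, 1], ['b', 'b', 'b', 'b']): A returns 0, B returns 4
import Mathlib
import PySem

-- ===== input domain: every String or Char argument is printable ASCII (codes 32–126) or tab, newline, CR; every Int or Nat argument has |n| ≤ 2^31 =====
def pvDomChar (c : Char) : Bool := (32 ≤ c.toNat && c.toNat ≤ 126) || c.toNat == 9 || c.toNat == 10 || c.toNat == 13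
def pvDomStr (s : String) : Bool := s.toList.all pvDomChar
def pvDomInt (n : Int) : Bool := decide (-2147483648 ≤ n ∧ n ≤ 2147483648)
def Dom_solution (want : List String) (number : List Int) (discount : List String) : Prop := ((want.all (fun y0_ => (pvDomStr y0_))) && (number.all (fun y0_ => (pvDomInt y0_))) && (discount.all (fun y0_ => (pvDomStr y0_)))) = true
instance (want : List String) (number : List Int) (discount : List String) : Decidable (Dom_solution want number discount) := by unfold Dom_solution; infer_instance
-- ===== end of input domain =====

-- B replaces A's per-slide membership/index scans and full list comparison with a
-- precomputed index dict, an ids array and an incrementally maintained matched counter.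

-- ===== PORT A =====
def stepA (want : List String) (number : List Int) (discount : List String) (total : Int)
    (st : List Int × Int) (i : Int) : List Int × Int :=
  let x := PySem.List.pyGetD discount (i - 1) ""
  let counts1 := if x ∈ want then
      st.1.set ((PySem.List.index? want x).getD 0) (st.1.getD ((PySem.List.index? want x).getD 0) 0 - 1)
    else st.1
  let y := PySem.List.pyGetD discount (i + total - 1) ""
  let counts2 := if y ∈ want then
      counts1.set ((PySem.List.index? want y).getD 0) (counts1.getD ((PySem.List.index? want y).getD 0) 0 + 1)
    else counts1
  (counts2, if counts2 = number then st.2 + 1 else st.2)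

def solution (want : List String) (number : List Int) (discount : List String) : Int :=
  let total := number.sum
  let answer : Int := 0
  let window := PySem.List.slice discount none (some total)
  let counts : List Int := want.map (fun item => (PySem.List.count window item : Int))
  let answer := if counts = number then answer + 1 else answer
  let st := (PySem.List.pyRange 1 ((discount.length : Int) - total + 1) 1).foldl
      (stepA want number discount total) (counts, answer)
  st.2

-- ===== PORT B =====
def moveAlt (number : List Int) (st : List Int × Int) (j : Int) (d : Int) : List Int × Int :=
  if 0 ≤ j then
    let jn := j.toNat
    let m1 := if st.1.getD jn 0 = number.getD jn 0 then st.2 - 1 else st.2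
    let c := st.1.set jn (st.1.getD jn 0 + d)
    let m2 := if c.getD jn 0 = number.getD jn 0 then m1 + 1 else m1
    (c, m2)
  else st

def stepB (number : List Int) (ids : List Int) (t : Int) (k : Nat)
    (st : (List Int × Int) × Int) (s : Int) : (List Int × Int) × Int :=
  let st1 := moveAlt number st.1 (PySem.List.pyGetD ids s (-1)) 1
  let st2 := moveAlt number st1 (PySem.List.pyGetD ids (s - t) (-1)) (-1)
  (st2, if st2.2 = (k : Int) then st.2 + 1 else st.2)

def solution_alt (want : List String) (number : List Int) (discount : List String) : Int :=
  let t := number.sum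
  let k := want.length
  if number.length ≠ k then 0 else
  let idx := (PySem.List.enumerate want 0).foldl
      (fun (d : PySem.Dict String Int) p => d.insert p.2 p.1) PySem.Dict.empty
  let ids : List Int := discount.map (fun x => idx.getD x (-1))
  let cnt : List Int := List.replicate k 0
  let matched : Int := (number.countP (fun n => n == 0) : Int)
  let st0 := (PySem.List.slice ids none (some t)).foldl (fun st j => moveAlt number st j 1) (cnt, matched)
  let answer : Int := if st0.2 = (k : Int) then 1 else 0
  let res := (PySem.List.pyRange t (ids.length : Int) 1).foldl (stepB number ids t k) (st0, answer)
  res.2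

-- ===== PRECONDITION & SPEC =====
-- Pre_ excludes malformed inputs outside the problem's natural domain: duplicate entries in
-- want (A updates only a duplicate's first index, making the tally accidental) and a negative
-- wanted total (A always raises IndexError there via out-of-range indexing).
def Pre_solution (want : List String) (number : List Int) (discount : List String) : Prop :=
  want.Nodup ∧ 0 ≤ number.sum
instance (want : List String) (number : List Int) (discount : List String) : Decidable (Pre_solution want number discount) := by unfold Pre_solution; infer_instance
def pvWitness_solution : List String × List Int × List String :=
  (["a", "b"], [1, 2], ["a", "b", "b", "x", "b", "b"])
def Spec_solution (want : List String) (number : List Int) (discount : List String) (out : Int) : Prop := out = solution_alt want number discount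
instance (want : List String) (number : List Int) (discount : List String) (out : Int) : Decidable (Spec_solution want number discount out) := by unfold Spec_solution; infer_instance

-- ===== CLAIM (what is proved, stated in full; the proofs are below) =====
def Claim_equal_solution : Prop := ∀ (want : List String) (number : List Int) (discount : List String), Dom_solution want number discount → Pre_solution want number discount → Spec_solution want number discount (solution want number discount)

-- ===== LEMMAS AND PROOFS =====

-- the dict B builds once (definitionally the fold inside solution_alt)
def bIdx (want : List String) : PySem.Dict String Int :=
  (PySem.List.enumerate want 0).foldl
    (fun (d : PySem.Dict String Int) p => d.insert p.2 p.1) PySem.Dict.empty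

-- the matched counter as a function of number and the counts list
def Mcnt : List Int → List Int → Int
  | n :: ns, x :: cs => (if x = n then 1 else 0) + Mcnt ns cs
  | _, _ => 0

-- additive in-place update, the common shape of both ports' counter writes
def updI (c : List Int) (j : Nat) (d : Int) : List Int := c.set j (c.getD j 0 + d)

-- the guarded A-side update
def updA (want : List String) (c : List Int) (x : String) (d : Int) : List Int :=
  if x ∈ want then updI c ((PySem.List.index? want x).getD 0) d else c

theorem getD_set_self (c : List Int) (j : Nat) (v : Int) (h : j < c.length) :
    (c.set j v).getD j 0 = v := by
  simp [List.getD_eq_getElem?_getD, h]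

theorem getD_set_ne (c : List Int) (i j : Nat) (v : Int) (h : i ≠ j) :
    (c.set i v).getD j 0 = c.getD j 0 := by
  simp [List.getD_eq_getElem?_getD, List.getElem?_set_ne h]

theorem Mcnt_nonneg : ∀ (ns cs : List Int), 0 ≤ Mcnt ns cs
  | [], cs => by cases cs <;> simp [Mcnt]
  | _ :: _, [] => by simp [Mcnt]
  | n :: ns, x :: cs => by
    have := Mcnt_nonneg ns cs
    simp only [Mcnt]; split <;> omega

theorem Mcnt_le_length : ∀ (ns cs : List Int), Mcnt ns cs ≤ (ns.length : Int)
  | [], cs => by cases cs <;> simp [Mcnt]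
  | _ :: _, [] => by simp [Mcnt]; positivity
  | n :: ns, x :: cs => by
    have := Mcnt_le_length ns cs
    simp only [Mcnt, List.length_cons]; push_cast; split <;> omega

theorem Mcnt_replicate : ∀ (ns : List Int),
    Mcnt ns (List.replicate ns.length 0) = (ns.countP (fun n => n == 0) : Int)
  | [] => by simp [Mcnt]
  | n :: ns => by
    simp only [List.length_cons, List.replicate_succ, Mcnt, List.countP_cons]
    by_cases h : n = 0
    · rw [if_pos h.symm, Mcnt_replicate ns]
      have hb : (n == 0) = true := by simpa using h
      rw [hb]; push_cast; norm_num; omega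
    · rw [if_neg (fun hh => h hh.symm)]
      have : (n == 0) = false := by simpa using h
      rw [this, Mcnt_replicate ns]; push_cast; omega

theorem Mcnt_eq_length_iff : ∀ (ns cs : List Int), cs.length = ns.length →
    (Mcnt ns cs = (ns.length : Int) ↔ cs = ns)
  | [], [] => by simp [Mcnt]
  | [], _ :: _ => by simp
  | _ :: _, [] => by simp
  | n :: ns, x :: cs => by
    intro h
    simp only [List.length_cons] at h
    have h' : cs.length = ns.length := by omega
    have hle := Mcnt_le_length ns cs
    have hnn := Mcnt_nonneg ns cs
    have ih := Mcnt_eq_length_iff ns cs h'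
    simp only [Mcnt, List.length_cons, List.cons.injEq]
    by_cases hx : x = n
    · rw [if_pos hx]
      constructor
      · intro hh
        refine ⟨hx, ih.mp ?_⟩; push_cast at hh ⊢; omega
      · rintro ⟨-, hcs⟩
        have := ih.mpr hcs; push_cast; omega
    · rw [if_neg hx]
      constructor
      · intro hh; exfalso; push_cast at hh; omega
      · rintro ⟨h1, -⟩; exact absurd h1 hx

theorem Mcnt_set : ∀ (j : Nat) (ns cs : List Int), j < cs.length → cs.length = ns.length →
    ∀ v, Mcnt ns (cs.set j v) =
      Mcnt ns cs - (if cs.getD j 0 = ns.getD j 0 then 1 else 0) + (if v = ns.getD j 0 then 1 else 0)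
  | 0, n :: ns, x :: cs, _, _, v => by
    simp only [List.set_cons_zero, Mcnt, List.getD_cons_zero]; split_ifs <;> omega
  | j + 1, n :: ns, x :: cs, hj, hl, v => by
    simp only [List.set_cons_succ, Mcnt, List.getD_cons_succ]
    rw [Mcnt_set j ns cs (by simpa using hj) (by simpa using hl) v]
    split_ifs <;> omega
  | 0, [], x :: cs, hj, hl, v => by simp at hl
  | _, _, [], hj, _, _ => by simp at hj
  | j + 1, [], x :: cs, hj, hl, v => by simp at hl

theorem moveAlt_M (number c : List Int) (hc : c.length = number.length) (j d : Int)
    (hj : 0 ≤ j → j.toNat < number.length) :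
    moveAlt number (c, Mcnt number c) j d =
      (if 0 ≤ j then updI c j.toNat d else c,
       Mcnt number (if 0 ≤ j then updI c j.toNat d else c)) := by
  by_cases h0 : 0 ≤ j
  · have hlt : j.toNat < c.length := by rw [hc]; exact hj h0
    simp only [moveAlt, updI, if_pos h0]
    refine Prod.ext rfl ?_
    simp only
    rw [getD_set_self c j.toNat _ hlt, Mcnt_set j.toNat number c hlt hc]
    split_ifs <;> omega
  · simp [moveAlt, h0]

theorem updI_comm (c : List Int) (i j : Nat) (a b : Int)
    (hi : i < c.length) (hj : j < c.length) :
    updI (updI c i a) j b = updI (updI c j b) i a := by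
  by_cases hij : i = j
  · subst hij
    simp only [updI]
    rw [getD_set_self c i _ hi, getD_set_self c i _ hi, List.set_set, List.set_set]
    congr 1; ring
  · simp only [updI]
    rw [getD_set_ne c i j _ hij, getD_set_ne c j i _ (Ne.symm hij), List.set_comm _ _ hij]

theorem bIdx_go (x : String) : ∀ (ws : List String), ws.Nodup →
    ∀ (s : Int) (d0 : PySem.Dict String Int),
    ((PySem.List.enumerate ws s).foldl (fun d p => d.insert p.2 p.1) d0).getD x (-1) =
      match PySem.List.index? ws x with
      | some k => s + (k : Int)
      | none => d0.getD x (-1)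
  | [], _, s, d0 => by
    simp [PySem.List.enumerate_nil, PySem.List.index?_eq_idxOf?, List.idxOf?_nil]
  | w :: ws, hnd, s, d0 => by
    rw [PySem.List.enumerate_cons, List.foldl_cons]
    have hnd' := (List.nodup_cons.mp hnd).2
    have hwm := (List.nodup_cons.mp hnd).1
    rw [bIdx_go x ws hnd' (s + 1) (d0.insert w s)]
    by_cases hxw : x = w
    · subst hxw
      have h1 : PySem.List.index? ws x = none := (PySem.List.index?_eq_none_iff ws x).mpr hwm
      have h2 : PySem.List.index? (x :: ws) x = some 0 := PySem.List.index?_cons_self _ _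
      rw [h1, h2]
      simp [PySem.Dict.getD_insert_self]
    · have h2 : PySem.List.index? (w :: ws) x = (PySem.List.index? ws x).map (· + 1) :=
        PySem.List.index?_cons_of_ne _ (fun h => hxw h.symm)
      rw [h2]
      cases hix : PySem.List.index? ws x with
      | none => simp [PySem.Dict.getD_insert_of_ne d0 s (-1) hxw]
      | some k => simp only [Option.map_some]; push_cast; ring

theorem bIdx_getD (want : List String) (x : String) (hnd : want.Nodup) :
    (bIdx want).getD x (-1) =
      match PySem.List.index? want x with
      | some k => (k : Int)
      | none => -1 := by
  rw [bIdx, bIdx_go x want hnd 0 PySem.Dict.empty]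
  cases PySem.List.index? want x <;> simp [PySem.Dict.getD_empty]

theorem index?_lt_length {want : List String} {x : String} {k : Nat}
    (h : PySem.List.index? want x = some k) : k < want.length := by
  obtain ⟨hk, -, -⟩ := PySem.List.getElem_of_index?_eq_some h
  exact hk

theorem map_bump (want : List String) (x : String) (kx : Nat) (hnd : want.Nodup)
    (hkx : PySem.List.index? want x = some kx) (f : String → Int) (d : Int) :
    updI (want.map f) kx d = want.map (fun w => if w = x then f w + d else f w) := by
  obtain ⟨hk, hgx, -⟩ := PySem.List.getElem_of_index?_eq_some hkx
  have hgetD : (want.map f).getD kx 0 = f x := by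
    rw [List.getD_eq_getElem?_getD]
    simp [List.getElem?_eq_getElem hk, hgx]
  apply List.ext_getElem
  · simp [updI]
  · intro j hj1 hj2
    have hjw : j < want.length := by simpa [updI] using hj1
    simp only [updI, hgetD]
    by_cases hjk : j = kx
    · subst hjk
      rw [List.getElem_set_self (by simpa using hk)]
      simp only [List.getElem_map]
      rw [if_pos hgx, hgx]
    · rw [List.getElem_set_ne (fun h => hjk h.symm)]
      have hne : want[j]'hjw ≠ x := by
        intro he
        exact hjk ((List.Nodup.getElem_inj_iff hnd).mp (by rw [he, hgx]))
      simp only [List.getElem_map]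
      rw [if_neg hne]

theorem length_updI (c : List Int) (j : Nat) (d : Int) : (updI c j d).length = c.length := by
  simp [updI]

theorem length_updA (want : List String) (c : List Int) (x : String) (d : Int) :
    (updA want c x d).length = c.length := by
  unfold updA
  split <;> simp [length_updI]

theorem stepA_eq (want : List String) (number : List Int) (discount : List String) (total : Int)
    (st : List Int × Int) (i : Int) :
    stepA want number discount total st i =
      (updA want (updA want st.1 (PySem.List.pyGetD discount (i - 1) "") (-1))
        (PySem.List.pyGetD discount (i + total - 1) "") 1,
       if updA want (updA want st.1 (PySem.List.pyGetD discount (i - 1) "") (-1))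
            (PySem.List.pyGetD discount (i + total - 1) "") 1 = number then st.2 + 1 else st.2) := by
  simp only [stepA, updA, updI, sub_eq_add_neg]

-- B's two moves applied to (c, Mcnt c) produce A's counter update and its matched value
theorem moves_corr (want : List String) (number : List Int)
    (hnd : want.Nodup) (hlen : want.length = number.length)
    (c : List Int) (hc : c.length = number.length) (x y : String) :
    moveAlt number (moveAlt number (c, Mcnt number c) ((bIdx want).getD y (-1)) 1)
        ((bIdx want).getD x (-1)) (-1) =
      (updA want (updA want c x (-1)) y 1, Mcnt number (updA want (updA want c x (-1)) y 1)) := by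
  rw [bIdx_getD want x hnd, bIdx_getD want y hnd]
  by_cases hy : y ∈ want
  · obtain ⟨ky, hky⟩ := Option.isSome_iff_exists.mp ((PySem.List.index?_isSome_iff want y).mpr hy)
    have hkyl : ky < want.length := index?_lt_length hky
    rw [hky]
    simp only
    rw [moveAlt_M number c hc (ky : Int) 1 (fun _ => by simpa [← hlen] using hkyl)]
    rw [if_pos (by positivity), Int.toNat_natCast]
    by_cases hx : x ∈ want
    · obtain ⟨kx, hkx⟩ := Option.isSome_iff_exists.mp ((PySem.List.index?_isSome_iff want x).mpr hx)
      have hkxl : kx < want.length := index?_lt_length hkx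
      rw [hkx]
      simp only
      rw [moveAlt_M number (updI c ky 1) (by simp [length_updI, hc]) (kx : Int) (-1)
            (fun _ => by simpa [← hlen] using hkxl)]
      rw [if_pos (by positivity), Int.toNat_natCast]
      have hcw : c.length = want.length := by rw [hc, hlen]
      rw [updI_comm c ky kx 1 (-1) (hcw ▸ hkyl) (hcw ▸ hkxl)]
      simp only [updA, if_pos hx, if_pos hy, hkx, hky, Option.getD_some]
    · have hknone : PySem.List.index? want x = none := (PySem.List.index?_eq_none_iff want x).mpr hx
      rw [hknone]
      simp only [moveAlt]
      rw [if_neg (by omega)]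
      simp only [updA, if_pos hy, if_neg hx, hky, Option.getD_some]
  · have hknone : PySem.List.index? want y = none := (PySem.List.index?_eq_none_iff want y).mpr hy
    rw [hknone]
    simp only
    conv_lhs => rw [show moveAlt number (c, Mcnt number c) (-1) 1 = (c, Mcnt number c) by
      simp [moveAlt]]
    by_cases hx : x ∈ want
    · obtain ⟨kx, hkx⟩ := Option.isSome_iff_exists.mp ((PySem.List.index?_isSome_iff want x).mpr hx)
      have hkxl : kx < want.length := index?_lt_length hkx
      rw [hkx]
      simp only
      rw [moveAlt_M number c hc (kx : Int) (-1) (fun _ => by simpa [← hlen] using hkxl)]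
      rw [if_pos (by positivity), Int.toNat_natCast]
      simp only [updA, if_pos hx, if_neg hy, hkx, Option.getD_some]
    · have hknone' : PySem.List.index? want x = none := (PySem.List.index?_eq_none_iff want x).mpr hx
      rw [hknone']
      simp only [moveAlt]
      rw [if_neg (by omega)]
      simp only [updA, if_neg hx, if_neg hy]

theorem loop_corr (want : List String) (number : List Int) (discount : List String)
    (hnd : want.Nodup) (hlen : want.length = number.length) (hT : 0 ≤ number.sum) :
    ∀ (m : Nat) (i : Int) (c : List Int) (ans : Int), c.length = number.length → 1 ≤ i →
      i + m = (discount.length : Int) - number.sum + 1 →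
      ((PySem.List.pyRange i ((discount.length : Int) - number.sum + 1) 1).foldl
          (stepA want number discount number.sum) (c, ans)).2 =
        ((PySem.List.pyRange (i + number.sum - 1) (discount.length : Int) 1).foldl
            (stepB number (discount.map (fun z => (bIdx want).getD z (-1))) number.sum want.length)
            ((c, Mcnt number c), ans)).2 := by
  intro m
  induction m with
  | zero =>
    intro i c ans hc hi heq
    rw [PySem.List.pyRange_one_eq_nil (by omega), PySem.List.pyRange_one_eq_nil (by omega)]
    rfl
  | succ m ih =>
    intro i c ans hc hi heq
    have hib : i < (discount.length : Int) - number.sum + 1 := by omega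
    have hib2 : i + number.sum - 1 < (discount.length : Int) := by omega
    rw [PySem.List.pyRange_one_cons hib, List.foldl_cons,
        PySem.List.pyRange_one_cons hib2, List.foldl_cons]
    rw [stepA_eq]
    simp only [stepB]
    have hlm : ((discount.map (fun z => (bIdx want).getD z (-1))).length : Int)
        = (discount.length : Int) := by simp
    have hge1 : 0 ≤ i + number.sum - 1 := by omega
    have hge2 : 0 ≤ i - 1 := by omega
    have hlt2 : i - 1 < (discount.length : Int) := by omega
    have hid1 : PySem.List.pyGetD (discount.map (fun z => (bIdx want).getD z (-1)))
        (i + number.sum - 1) (-1) =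
        (bIdx want).getD (PySem.List.pyGetD discount (i + number.sum - 1) "") (-1) := by
      rw [PySem.List.pyGetD_eq_getElem _ _ hge1 (by rw [hlm]; exact hib2),
          PySem.List.pyGetD_eq_getElem _ _ hge1 hib2, List.getElem_map]
    have hid2 : PySem.List.pyGetD (discount.map (fun z => (bIdx want).getD z (-1)))
        (i + number.sum - 1 - number.sum) (-1) =
        (bIdx want).getD (PySem.List.pyGetD discount (i - 1) "") (-1) := by
      rw [show i + number.sum - 1 - number.sum = i - 1 by ring]
      rw [PySem.List.pyGetD_eq_getElem _ _ hge2 (by rw [hlm]; exact hlt2),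
          PySem.List.pyGetD_eq_getElem _ _ hge2 hlt2, List.getElem_map]
    rw [hid1, hid2]
    rw [moves_corr want number hnd hlen c hc
        (PySem.List.pyGetD discount (i - 1) "") (PySem.List.pyGetD discount (i + number.sum - 1) "")]
    have hc2 : (updA want (updA want c (PySem.List.pyGetD discount (i - 1) "") (-1))
        (PySem.List.pyGetD discount (i + number.sum - 1) "") 1).length = number.length := by
      rw [length_updA, length_updA]; exact hc
    have hiff : (Mcnt number (updA want (updA want c (PySem.List.pyGetD discount (i - 1) "") (-1))
          (PySem.List.pyGetD discount (i + number.sum - 1) "") 1) = (want.length : Int)) ↔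
        (updA want (updA want c (PySem.List.pyGetD discount (i - 1) "") (-1))
          (PySem.List.pyGetD discount (i + number.sum - 1) "") 1 = number) := by
      rw [hlen]
      exact Mcnt_eq_length_iff number _ hc2
    rw [if_congr hiff rfl rfl]
    have := ih (i + 1)
      (updA want (updA want c (PySem.List.pyGetD discount (i - 1) "") (-1))
        (PySem.List.pyGetD discount (i + number.sum - 1) "") 1)
      (if updA want (updA want c (PySem.List.pyGetD discount (i - 1) "") (-1))
          (PySem.List.pyGetD discount (i + number.sum - 1) "") 1 = number then ans + 1 else ans)
      hc2 (by omega) (by push_cast at heq ⊢; omega)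
    rw [show i + 1 + number.sum - 1 = i + number.sum - 1 + 1 by ring] at this
    exact this

theorem foldB_count (want : List String) (number : List Int)
    (hnd : want.Nodup) (hlen : want.length = number.length) :
    ∀ (xs : List String) (f : String → Int),
      xs.foldl (fun st x => moveAlt number st ((bIdx want).getD x (-1)) 1)
          (want.map f, Mcnt number (want.map f)) =
        (want.map (fun w => f w + (xs.count w : Int)),
         Mcnt number (want.map (fun w => f w + (xs.count w : Int)))) := by
  intro xs
  induction xs with
  | nil => intro f; simp
  | cons x xs ih =>
    intro f
    rw [List.foldl_cons, bIdx_getD want x hnd]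
    by_cases hx : x ∈ want
    · obtain ⟨kx, hkx⟩ := Option.isSome_iff_exists.mp ((PySem.List.index?_isSome_iff want x).mpr hx)
      have hkxl : kx < want.length := index?_lt_length hkx
      rw [hkx]
      simp only
      rw [moveAlt_M number (want.map f) (by simp [hlen]) (kx : Int) 1
            (fun _ => by simpa [← hlen] using hkxl)]
      rw [if_pos (by positivity), Int.toNat_natCast]
      rw [map_bump want x kx hnd hkx f 1]
      rw [ih (fun w => if w = x then f w + 1 else f w)]
      have hmap : want.map (fun w => (if w = x then f w + 1 else f w) + (xs.count w : Int)) =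
          want.map (fun w => f w + (((x :: xs).count w : Nat) : Int)) := by
        apply List.map_congr_left
        intro w hw
        rw [List.count_cons]
        by_cases hwx : w = x
        · rw [if_pos hwx, hwx]
          have : (x == x) = true := by simp
          rw [this]
          push_cast [if_pos rfl]
          ring
        · rw [if_neg hwx]
          have : (x == w) = false := by simpa using fun h => hwx h.symm
          rw [this]
          simp
      rw [hmap]
    · have hknone : PySem.List.index? want x = none := (PySem.List.index?_eq_none_iff want x).mpr hx
      rw [hknone]
      simp only
      have hmove : moveAlt number (want.map f, Mcnt number (want.map f)) (-1) 1
          = (want.map f, Mcnt number (want.map f)) := by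
        simp [moveAlt]
      rw [hmove, ih f]
      have hmap : want.map (fun w => f w + (xs.count w : Int)) =
          want.map (fun w => f w + (((x :: xs).count w : Nat) : Int)) := by
        apply List.map_congr_left
        intro w hw
        rw [List.count_cons]
        have : (x == w) = false := by
          simp only [beq_eq_false_iff_ne, ne_eq]
          intro he; exact hx (he ▸ hw)
        rw [this]
        simp
      rw [hmap]

theorem foldA_ne (want : List String) (number : List Int) (discount : List String)
    (total : Int) (hne : want.length ≠ number.length) :
    ∀ (l : List Int) (c : List Int) (ans : Int), c.length = want.length →
      (l.foldl (stepA want number discount total) (c, ans)).2 = ans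
  | [], c, ans, _ => rfl
  | i :: l, c, ans, hc => by
    rw [List.foldl_cons, stepA_eq]
    have hlen2 : (updA want (updA want c (PySem.List.pyGetD discount (i - 1) "") (-1))
        (PySem.List.pyGetD discount (i + total - 1) "") 1).length = want.length := by
      rw [length_updA, length_updA]; exact hc
    rw [if_neg (fun h => hne (by rw [← hlen2, h]))]
    exact foldA_ne want number discount total hne l _ ans hlen2

-- ===== VERDICT (by name: the statement is the Claim_ definition above) =====
theorem solution_spec : Claim_equal_solution := by
  unfold Claim_equal_solution
  intro want number discount hdom hpre
  obtain ⟨hnd, hT⟩ := hpre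
  unfold Spec_solution solution solution_alt
  by_cases hlen : want.length = number.length
  case neg =>
    rw [if_pos (fun h => hlen h.symm)]
    simp only [PySem.List.count_eq]
    rw [foldA_ne want number discount number.sum hlen _ _ _ (by simp)]
    rw [if_neg (fun h => hlen (by rw [← congrArg List.length h]; simp))]
  rw [if_neg (fun h => h hlen.symm)]
  simp only [PySem.List.count_eq]
  rw [PySem.List.slice_to discount hT,
      PySem.List.slice_to (List.map (fun x => ((PySem.List.enumerate want 0).foldl
        (fun (d : PySem.Dict String Int) p => d.insert p.2 p.1) PySem.Dict.empty).getD x (-1)) discount) hT]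
  rw [show ((PySem.List.enumerate want 0).foldl
      (fun (d : PySem.Dict String Int) p => d.insert p.2 p.1) PySem.Dict.empty) = bIdx want from rfl]
  rw [← List.map_take]
  simp only [List.foldl_map, List.length_map]
  rw [show List.replicate want.length (0 : Int) = want.map (fun _ => (0 : Int)) from by
      rw [List.map_const']]
  rw [show (number.countP (fun n => n == 0) : Int) = Mcnt number (want.map (fun _ => (0 : Int))) by
      rw [show want.map (fun _ => (0 : Int)) = List.replicate number.length 0 from by
        rw [List.map_const', hlen]]
      exact (Mcnt_replicate number).symm]
  rw [foldB_count want number hnd hlen (discount.take number.sum.toNat) (fun _ => 0)]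
  simp only [zero_add]
  have hcl : (want.map (fun w => ((discount.take number.sum.toNat).count w : Int))).length
      = number.length := by simp [hlen]
  have hiff : (Mcnt number (want.map (fun w => ((discount.take number.sum.toNat).count w : Int)))
        = (want.length : Int)) ↔
      (want.map (fun w => ((discount.take number.sum.toNat).count w : Int)) = number) := by
    rw [hlen]
    exact Mcnt_eq_length_iff number _ hcl
  rw [if_congr hiff rfl rfl]
  by_cases hcase : (discount.length : Int) - number.sum + 1 ≤ 1
  · rw [PySem.List.pyRange_one_eq_nil hcase,
        PySem.List.pyRange_one_eq_nil (by omega : (discount.length : Int) ≤ number.sum)]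
    rfl
  · have hrun := loop_corr want number discount hnd hlen hT
      ((discount.length : Int) - number.sum).toNat 1
      (want.map (fun w => ((discount.take number.sum.toNat).count w : Int)))
      (if want.map (fun w => ((discount.take number.sum.toNat).count w : Int)) = number
        then 1 else 0)
      hcl (le_refl 1) (by omega)
    rw [show (1 : Int) + number.sum - 1 = number.sum by ring] at hrun
    exact hrun
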